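-- pv_equiv track=rewrite | github.com/AugustinMaker/EVAL-AD5933-analysis-help | V1/conversion.py | modification_function
-- ===== SOURCE A (Python) =====
-- def modification_function(rows):
--     modified_rows = []
--
--     first_row = rows[0]
--
--     # Ajouter la première ligne modifiée à la liste des lignes modifiées
--     line = ','.join(first_row)
--     new_line = ''
--     for char in line:
--         if char == ',':
--             new_line += ';'
--         else:
--             new_line += char
--     new_line = new_line[:-1]
--     modified_row = new_line.split(',')
--     modified_rows.append(modified_row)
--
--     # Indices des virgules à remplacer pour les autres lignes
--     indices_to_replace = [0, 2, 4, 5, 6]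
--
--     # Traiter les autres lignes
--     for row in rows[1:]:
--         line = ','.join(row)
--         new_line = ''
--         comma_count = 0
--
--         for i, char in enumerate(line):
--             if char == ',':
--                 if comma_count in indices_to_replace:
--                     new_line += ';'
--                 else:
--                     new_line += ','
--                 comma_count += 1
--             else:
--                 new_line += char
--
--         modified_row = new_line.split(',')
--         modified_rows.append(modified_row)
--     return modified_rows
-- ===== SOURCE B (Python) =====
-- def modification_function(rows):
--     # Rebuild each line segment-wise from its split, instead of scanning characters.
--     def rebuild(row):
--         parts = ','.join(row).split(',')
--         new_line = parts[0]
--         for i, p in enumerate(parts[1:]):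
--             new_line += (';' if i in (0, 2, 4, 5, 6) else ',') + p
--         return new_line.split(',')
--     first = ';'.join(','.join(rows[0]).split(','))[:-1].split(',')
--     return [first] + [rebuild(row) for row in rows[1:]]
-- ===== Notes on version B (the rewrite author's own statement) =====
-- stated objective: alternative
-- what changed: B splits each joined line on ',' once and rebuilds it segment-wise, choosing each separator (';' or ',') by its index, instead of A's character-by-character scan with a running comma counter; the first row becomes a ';'.join of the split followed by the same drop-last-character step.
import Mathlib
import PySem

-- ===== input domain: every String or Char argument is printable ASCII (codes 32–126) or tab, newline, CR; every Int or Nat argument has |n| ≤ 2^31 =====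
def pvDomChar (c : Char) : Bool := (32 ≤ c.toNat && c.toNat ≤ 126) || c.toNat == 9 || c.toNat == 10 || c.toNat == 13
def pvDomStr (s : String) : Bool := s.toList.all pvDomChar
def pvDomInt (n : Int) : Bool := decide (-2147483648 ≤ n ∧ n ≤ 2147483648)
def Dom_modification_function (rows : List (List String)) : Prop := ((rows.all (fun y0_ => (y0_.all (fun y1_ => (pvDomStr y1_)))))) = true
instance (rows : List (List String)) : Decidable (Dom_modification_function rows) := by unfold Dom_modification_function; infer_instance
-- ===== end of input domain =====

-- B rebuilds each joined line segment-wise from its split(',') instead of A's character-by-character scan with a comma counter (objective: alternative decomposition, same cost).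

-- ===== PORT A =====
def modification_function (rows : List (List String)) : List (List String) :=
  match rows with
  | [] => []   -- Python raises IndexError on rows[0]; excluded by Pre_
  | first_row :: _ =>
    let line := PySem.Chars.join [','] (first_row.map String.toList)
    let new_line := line.foldl (fun acc ch => if ch = ',' then acc ++ [';'] else acc ++ [ch]) []
    let new_line2 := PySem.List.slice new_line none (some (-1))
    let modified_row := (PySem.Chars.splitOn new_line2 [',']).map String.ofList
    (PySem.List.slice rows (some 1) none).foldl (fun acc row =>
      let line := PySem.Chars.join [','] (row.map String.toList)
      let st := line.foldl (fun (st : List Char × Int) ch =>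
        if ch = ',' then
          if st.2 ∈ ([0, 2, 4, 5, 6] : List Int) then (st.1 ++ [';'], st.2 + 1)
          else (st.1 ++ [','], st.2 + 1)
        else (st.1 ++ [ch], st.2)) ([], 0)
      acc ++ [(PySem.Chars.splitOn st.1 [',']).map String.ofList]) [modified_row]

-- ===== PORT B =====
def pvRebuild (row : List String) : List String :=
  let parts := PySem.Chars.splitOn (PySem.Chars.join [','] (row.map String.toList)) [',']
  let new_line := (PySem.List.enumerate (PySem.List.slice parts (some 1) none)).foldl
    (fun acc ip => acc ++ (if ip.1 ∈ ([0, 2, 4, 5, 6] : List Int) then [';'] else [',']) ++ ip.2)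
    (PySem.List.pyGetD parts 0 [])
  (PySem.Chars.splitOn new_line [',']).map String.ofList

def modification_function_alt (rows : List (List String)) : List (List String) :=
  match rows with
  | [] => []   -- Python raises IndexError on rows[0]; excluded by Pre_
  | first :: _ =>
    let firstOut := (PySem.Chars.splitOn
      (PySem.List.slice (PySem.Chars.join [';']
        (PySem.Chars.splitOn (PySem.Chars.join [','] (first.map String.toList)) [','])) none (some (-1)))
      [',']).map String.ofList
    [firstOut] ++ (PySem.List.slice rows (some 1) none).map pvRebuild

-- ===== PRECONDITION & SPEC =====
-- Pre_ excludes only the empty list, on which A (rows[0]) raises IndexError.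
def Pre_modification_function (rows : List (List String)) : Prop := rows ≠ []
instance (rows : List (List String)) : Decidable (Pre_modification_function rows) := by unfold Pre_modification_function; infer_instance
def pvWitness_modification_function : List (List String) := [["a", "b"], ["c", "d"]]

def Spec_modification_function (rows : List (List String)) (out : List (List String)) : Prop := out = modification_function_alt rows
instance (rows : List (List String)) (out : List (List String)) : Decidable (Spec_modification_function rows out) := by unfold Spec_modification_function; infer_instance

-- ===== CLAIM (what is proved, stated in full; the proofs are below) =====
def Claim_equal_modification_function : Prop := ∀ (rows : List (List String)), Dom_modification_function rows → Pre_modification_function rows → Spec_modification_function rows (modification_function rows)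

-- ===== LEMMAS AND PROOFS =====

-- Structural version of split-on-comma (proof helper).
def pvSplit : List Char → List (List Char)
  | [] => [[]]
  | c :: t => if c = ',' then [] :: pvSplit t else (pvSplit t).modifyHead (c :: ·)

def pvSep (c : Int) : List Char := if c ∈ ([0, 2, 4, 5, 6] : List Int) then [';'] else [',']

def pvJoinTail (c : Int) : List (List Char) → List Char
  | [] => []
  | q :: qs => pvSep c ++ q ++ pvJoinTail (c + 1) qs

lemma pvSplit_ne_nil (s : List Char) : pvSplit s ≠ [] := by
  induction s with
  | nil => simp [pvSplit]
  | cons c t ih =>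
    simp only [pvSplit]
    split_ifs
    · simp
    · cases h : pvSplit t with
      | nil => exact absurd h ih
      | cons p ps => simp

lemma pvSplitOn_go_eq (fuel : Nat) : ∀ (l cur : List Char) (acc : List (List Char)),
    l.length ≤ fuel →
    PySem.Chars.splitOn.go [','] fuel l cur acc
      = acc.reverse ++ (pvSplit l).modifyHead (cur.reverse ++ ·) := by
  induction fuel with
  | zero =>
    intro l cur acc h
    have : l = [] := List.eq_nil_of_length_eq_zero (Nat.le_zero.mp h)
    subst this
    simp [PySem.Chars.splitOn.go, pvSplit]
  | succ f ih =>
    intro l cur acc h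
    cases l with
    | nil => simp [PySem.Chars.splitOn.go, pvSplit]
    | cons c rest =>
      by_cases hc : c = ','
      · subst hc
        have hpre : List.isPrefixOf [','] (',' :: rest) = true := by
          simp [List.isPrefixOf]
        rw [show PySem.Chars.splitOn.go [','] (f + 1) (',' :: rest) cur acc
              = PySem.Chars.splitOn.go [','] f (List.drop 1 (',' :: rest)) [] (cur.reverse :: acc) by
            simp [PySem.Chars.splitOn.go, hpre]]
        rw [ih _ _ _ (by simpa using Nat.le_of_succ_le_succ h)]
        cases hs : pvSplit rest with
        | nil => exact absurd hs (pvSplit_ne_nil rest)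
        | cons p ps => simp [pvSplit, hs]
      · have hpre : List.isPrefixOf [','] (c :: rest) = false := by
          simp [List.isPrefixOf]
          exact fun hh => absurd hh.symm hc
        rw [show PySem.Chars.splitOn.go [','] (f + 1) (c :: rest) cur acc
              = PySem.Chars.splitOn.go [','] f rest (c :: cur) acc by
            simp [PySem.Chars.splitOn.go, hpre]]
        rw [ih _ _ _ (by simpa using Nat.le_of_succ_le_succ h)]
        cases hs : pvSplit rest with
        | nil => exact absurd hs (pvSplit_ne_nil rest)
        | cons p ps => simp [pvSplit, hc, hs]

lemma pvSplitOn_eq (s : List Char) : PySem.Chars.splitOn s [','] = pvSplit s := by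
  rw [PySem.Chars.splitOn, pvSplitOn_go_eq (s.length + 1) s [] [] (by omega)]
  simp
  cases hs : pvSplit s with
  | nil => exact absurd hs (pvSplit_ne_nil s)
  | cons p ps => simp

lemma pvScanA (s : List Char) : ∀ (c : Int) (acc : List Char),
    (s.foldl (fun (st : List Char × Int) ch =>
        if ch = ',' then
          if st.2 ∈ ([0, 2, 4, 5, 6] : List Int) then (st.1 ++ [';'], st.2 + 1)
          else (st.1 ++ [','], st.2 + 1)
        else (st.1 ++ [ch], st.2)) (acc, c)).1
      = acc ++ (pvSplit s).headD [] ++ pvJoinTail c (pvSplit s).tail := by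
  induction s with
  | nil => intro c acc; simp [pvSplit, pvJoinTail]
  | cons ch t ih =>
    intro c acc
    simp only [List.foldl_cons]
    split_ifs with h1 h2
    · subst h1
      rw [ih]
      cases hs : pvSplit t with
      | nil => exact absurd hs (pvSplit_ne_nil t)
      | cons p ps => simp [pvSplit, hs, pvJoinTail, pvSep, h2]
    · subst h1
      rw [ih]
      cases hs : pvSplit t with
      | nil => exact absurd hs (pvSplit_ne_nil t)
      | cons p ps => simp [pvSplit, hs, pvJoinTail, pvSep, h2]
    · rw [ih]
      cases hs : pvSplit t with
      | nil => exact absurd hs (pvSplit_ne_nil t)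
      | cons p ps => simp [pvSplit, hs, h1]

lemma pvScanB (ps : List (List Char)) : ∀ (k : Int) (acc : List Char),
    (PySem.List.enumerate ps k).foldl
      (fun acc ip => acc ++ (if ip.1 ∈ ([0, 2, 4, 5, 6] : List Int) then [';'] else [',']) ++ ip.2) acc
      = acc ++ pvJoinTail k ps := by
  induction ps with
  | nil => intro k acc; simp [PySem.List.enumerate, pvJoinTail]
  | cons q qs ih =>
    intro k acc
    rw [PySem.List.enumerate_cons]
    simp only [List.foldl_cons]
    rw [ih (k + 1)]
    simp [pvJoinTail, pvSep]

lemma pvMapRepl (s : List Char) : ∀ (acc : List Char),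
    s.foldl (fun acc ch => if ch = ',' then acc ++ [';'] else acc ++ [ch]) acc
      = acc ++ PySem.Chars.join [';'] (pvSplit s) := by
  induction s with
  | nil => intro acc; simp [pvSplit, PySem.Chars.join, List.intercalate]
  | cons ch t ih =>
    intro acc
    simp only [List.foldl_cons]
    split_ifs with h1
    · subst h1
      rw [ih]
      cases hs : pvSplit t with
      | nil => exact absurd hs (pvSplit_ne_nil t)
      | cons p ps => cases ps <;> simp [pvSplit, hs, PySem.Chars.join, List.intercalate]
    · rw [ih]
      cases hs : pvSplit t with
      | nil => exact absurd hs (pvSplit_ne_nil t)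
      | cons p ps => cases ps <;> simp [pvSplit, hs, h1, PySem.Chars.join, List.intercalate]

-- ===== VERDICT (by name: the statement is the Claim_ definition above) =====
theorem modification_function_spec : Claim_equal_modification_function := by
  intro rows _ hpre
  unfold Spec_modification_function
  cases rows with
  | nil => exact absurd rfl hpre
  | cons first rest =>
    simp only [modification_function, modification_function_alt,
      PySem.List.slice_from_one, List.tail_cons]
    rw [PySem.List.foldl_append_singleton_eq_map]
    congr 1
    · -- first row
      rw [pvMapRepl _ []]
      simp only [pvSplitOn_eq, List.nil_append]
    · -- other rows
      apply List.map_congr_left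
      intro row _
      rw [pvScanA _ 0 []]
      simp only [pvRebuild, pvSplitOn_eq, PySem.List.slice_from_one]
      cases hs : pvSplit (PySem.Chars.join [','] (List.map String.toList row)) with
      | nil => exact absurd hs (pvSplit_ne_nil _)
      | cons p ps =>
        rw [List.tail_cons, pvScanB ps 0]
        simp [PySem.List.pyGetD_zero_cons]
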